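-- pv_equiv track=rewrite | github.com/ctrlArda/pulsar | engine/helioguard/data_sources.py | _combine_source_state
-- ===== SOURCE A (Python) =====
-- def _combine_source_state(states: list[str]) -> str:
--     filtered = [state for state in states if state]
--     unique = set(filtered)
--     if not unique:
--         return "degraded"
--     if len(unique) == 1:
--         return filtered[0]
--     if unique == {"live", "cached"}:
--         return "degraded"
--     return "degraded"
-- ===== SOURCE B (Python) =====
-- def _combine_source_state(states: list[str]) -> str:
--     candidate = None
--     for state in states:
--         if not state:
--             continue
--         if candidate is None:
--             candidate = state
--         elif state != candidate:
--             return "degraded"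
--     return candidate if candidate is not None else "degraded"
-- ===== Notes on version B (the rewrite author's own statement) =====
-- stated objective: simpler
-- what changed: Replaced building a filtered list plus a set and inspecting its size with a single early-exit scan that tracks one candidate state and returns 'degraded' on the first conflicting truthy state.
import Mathlib
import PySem

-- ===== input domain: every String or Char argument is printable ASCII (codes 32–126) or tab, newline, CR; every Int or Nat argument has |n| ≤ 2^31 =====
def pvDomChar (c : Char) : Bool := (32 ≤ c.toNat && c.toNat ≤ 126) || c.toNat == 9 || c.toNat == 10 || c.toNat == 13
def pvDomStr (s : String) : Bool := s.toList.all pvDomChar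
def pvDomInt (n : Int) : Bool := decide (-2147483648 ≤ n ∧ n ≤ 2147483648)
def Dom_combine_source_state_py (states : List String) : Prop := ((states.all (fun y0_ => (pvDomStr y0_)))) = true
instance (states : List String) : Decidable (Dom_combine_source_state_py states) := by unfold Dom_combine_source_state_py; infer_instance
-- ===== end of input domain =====

-- B replaces A's filtered-list + set construction with a single early-exit scan tracking one candidate state (objective: simpler).


-- ===== PORT A =====
def combine_source_state_py (states : List String) : String :=
  let filtered := states.filter (fun state => !(state == ""))
  let unique : PySem.Set String := PySem.Set.ofList filtered
  if unique = [] then "degraded"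
  else if PySem.Set.len unique = 1 then
    match PySem.List.pyGet? filtered 0 with
    | some s => s
    | none => "degraded"   -- unreachable: filtered nonempty here
  else if PySem.Set.equal unique (PySem.Set.ofList ["live", "cached"]) then "degraded"
  else "degraded"

-- ===== PORT B =====
def combine_source_state_py_altAux (candidate : Option String) : List String → String
  | [] => match candidate with | some c => c | none => "degraded"
  | state :: rest =>
    if state == "" then combine_source_state_py_altAux candidate rest
    else match candidate with
      | none => combine_source_state_py_altAux (some state) rest
      | some c => if state == c then combine_source_state_py_altAux candidate rest else "degraded"

def combine_source_state_py_alt (states : List String) : String :=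
  combine_source_state_py_altAux none states

-- ===== PRECONDITION & SPEC =====
def Spec_combine_source_state_py (states : List String) (out : String) : Prop := out = combine_source_state_py_alt states
instance (states : List String) (out : String) : Decidable (Spec_combine_source_state_py states out) := by unfold Spec_combine_source_state_py; infer_instance

-- ===== CLAIM (what is proved, stated in full; the proofs are below) =====
def Claim_equal_combine_source_state_py : Prop := ∀ (states : List String), Dom_combine_source_state_py states → Spec_combine_source_state_py states (combine_source_state_py states)

-- ===== LEMMAS AND PROOFS =====

-- B's aux with a committed candidate returns c iff every remaining truthy state equals c.
theorem altAux_some (l : List String) (c : String) :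
    combine_source_state_py_altAux (some c) l =
      if (l.filter (fun s => !(s == ""))).all (fun s => s == c) then c else "degraded" := by
  induction l with
  | nil => simp [combine_source_state_py_altAux]
  | cons x r ih =>
    by_cases hx : x = ""
    · simp [combine_source_state_py_altAux, hx, ih]
    · by_cases hc : x = c
      · simp [combine_source_state_py_altAux, hx, hc, ih]
      · simp [combine_source_state_py_altAux, hx, hc]

-- B skips falsy prefixes before committing a candidate.
theorem altAux_none (l : List String) :
    combine_source_state_py_altAux none l =
      match l.filter (fun s => !(s == "")) with
      | [] => "degraded"
      | s :: r => if r.all (fun x => x == s) then s else "degraded" := by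
  induction l with
  | nil => simp [combine_source_state_py_altAux]
  | cons x r ih =>
    by_cases hx : x = ""
    · simp [combine_source_state_py_altAux, hx, ih]
    · simp [combine_source_state_py_altAux, hx, altAux_some]

-- Set.add never shrinks.
theorem length_add_ge (acc : PySem.Set String) (x : String) :
    acc.length ≤ (PySem.Set.add acc x).length := by
  unfold PySem.Set.add
  split <;> simp

theorem length_foldl_add_ge (r : List String) (acc : PySem.Set String) :
    acc.length ≤ (r.foldl PySem.Set.add acc).length := by
  induction r generalizing acc with
  | nil => simp
  | cons x r ih => exact le_trans (length_add_ge acc x) (ih _)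

theorem foldl_add_all_mem (r : List String) (acc : PySem.Set String)
    (h : r.all (fun x => acc.contains x)) : r.foldl PySem.Set.add acc = acc := by
  induction r with
  | nil => rfl
  | cons x r ih =>
    simp only [List.all_cons, Bool.and_eq_true] at h
    have hm : x ∈ acc := by simpa [PySem.Set.contains] using h.1
    simpa [PySem.Set.add, hm] using ih h.2

theorem foldl_add_grows (r : List String) (acc : PySem.Set String)
    (h : ¬ r.all (fun x => acc.contains x) = true) :
    acc.length < (r.foldl PySem.Set.add acc).length := by
  induction r generalizing acc with
  | nil => simp at h
  | cons x r ih =>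
    simp only [List.all_cons, Bool.and_eq_true] at h
    by_cases hx : acc.contains x = true
    · have hm : x ∈ acc := by simpa [PySem.Set.contains] using hx
      have := ih acc (by tauto)
      simpa [PySem.Set.add, hm] using this
    · have hm : x ∉ acc := by simpa [PySem.Set.contains] using hx
      have h1 : acc.length < (PySem.Set.add acc x).length := by
        unfold PySem.Set.add; simp [hm]
      exact lt_of_lt_of_le h1 (by simpa [List.foldl] using length_foldl_add_ge r (PySem.Set.add acc x))

-- ===== VERDICT (by name: the statement is the Claim_ definition above) =====
theorem combine_source_state_py_spec : Claim_equal_combine_source_state_py := by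
  intro states _
  unfold Spec_combine_source_state_py combine_source_state_py combine_source_state_py_alt
  rw [altAux_none]
  cases hf : states.filter (fun s => !(s == "")) with
  | nil => simp [PySem.Set.ofList]
  | cons s r =>
    simp only [PySem.Set.ofList_eq_foldl]
    have hstep : (s :: r).foldl PySem.Set.add [] = r.foldl PySem.Set.add [s] := by
      simp [List.foldl, PySem.Set.add, PySem.Set.contains]
    simp only [hstep, ite_self]
    by_cases hall : r.all (fun x => x == s) = true
    · have hall' : r.all (fun x => ([s] : PySem.Set String).contains x) = true := by
        simpa [PySem.Set.contains] using hall
      rw [foldl_add_all_mem r [s] hall']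
      simp [PySem.Set.len, PySem.List.pyGet?, PySem.List.pyIdx?, hall]
    · have hall' : ¬ r.all (fun x => ([s] : PySem.Set String).contains x) = true := by
        simpa [PySem.Set.contains] using hall
      have hlt := foldl_add_grows r [s] hall'
      have hne : r.foldl PySem.Set.add [s] ≠ [] := by
        intro h; rw [h] at hlt; simp at hlt
      simp only [List.length_cons, List.length_nil] at hlt
      simp [hne, hall]
      omega
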